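-- pv_equiv track=rewrite | github.com/peipei82417/BulkFolderRenameTool | initialScript.py | getPairList
-- ===== SOURCE A (Python) =====
-- def getPairList(strList):
--     pairList = []
--     pair = []
--     i = 0
--     while i < len(strList):
--         if len(strList[i]) == 0:
--             if len(pair) == 0:
--                 pair.append(i)
--             elif len(pair) == 1:
--                 pair.append(i-1)
--                 pairList.append(pair)
--                 pair = [i]
--         i += 1
--     else:
--         pair.append(len(strList)-1)
--         pairList.append(pair)
--     return pairList
-- ===== SOURCE B (Python) =====
-- def getPairList(strList):
--     empties = [i for i in range(len(strList)) if len(strList[i]) == 0]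
--     pairList = [[empties[j], empties[j + 1] - 1] for j in range(len(empties) - 1)]
--     pairList.append(empties[-1:] + [len(strList) - 1])
--     return pairList
-- ===== Notes on version B (the rewrite author's own statement) =====
-- stated objective: simpler
-- what changed: Replaced A's single stateful while loop carrying a running 'pair' accumulator with two phases: first collect the list of empty-string indices, then form the output by pairing consecutive entries of that table and appending the final segment.
import Mathlib
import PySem

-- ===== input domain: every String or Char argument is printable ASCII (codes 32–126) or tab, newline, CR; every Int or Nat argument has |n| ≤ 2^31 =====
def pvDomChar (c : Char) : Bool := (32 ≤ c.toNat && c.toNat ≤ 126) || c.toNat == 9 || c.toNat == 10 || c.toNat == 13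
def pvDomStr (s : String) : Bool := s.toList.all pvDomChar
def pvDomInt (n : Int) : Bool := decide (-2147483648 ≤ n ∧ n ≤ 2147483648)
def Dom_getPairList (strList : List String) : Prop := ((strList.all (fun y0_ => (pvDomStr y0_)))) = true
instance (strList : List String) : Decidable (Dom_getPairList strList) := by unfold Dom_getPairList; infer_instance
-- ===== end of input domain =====

-- B replaces A's stateful running-pair while loop by two phases: build the empty-index table, then pair consecutive entries (objective: simpler).

-- ===== PORT A =====
-- the body of A's while loop: state is (pairList, pair), i the loop counter
def stepA (strList : List String) (st : List (List Int) × List Int) (i : Nat) :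
    List (List Int) × List Int :=
  if PySem.Str.len (strList.getD i "") == 0 then
    if st.2.length == 0 then (st.1, st.2 ++ [(Int.ofNat i)])
    else if st.2.length == 1 then (st.1 ++ [st.2 ++ [(Int.ofNat i) - 1]], [(Int.ofNat i)])
    else st
  else st

def getPairList (strList : List String) : List (List Int) :=
  match (List.range strList.length).foldl (stepA strList) ([], []) with
  | (pairList, pair) => pairList ++ [pair ++ [(strList.length : Int) - 1]]

-- ===== PORT B =====
-- B phase 1: the comprehension collecting the indices of the empty strings
def emptiesOf (strList : List String) : List Int :=
  ((List.range strList.length).filter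
    (fun i => PySem.Str.len (strList.getD i "") == 0)).map (fun i => Int.ofNat i)

def getPairList_alt (strList : List String) : List (List Int) :=
  ((List.range ((emptiesOf strList).length - 1)).map
    (fun j => [(emptiesOf strList).getD j 0, (emptiesOf strList).getD (j + 1) 0 - 1]))
  ++ [(emptiesOf strList).drop ((emptiesOf strList).length - 1) ++ [(strList.length : Int) - 1]]

-- ===== PRECONDITION & SPEC =====
def Spec_getPairList (strList : List String) (out : List (List Int)) : Prop := out = getPairList_alt strList
instance (strList : List String) (out : List (List Int)) : Decidable (Spec_getPairList strList out) := by unfold Spec_getPairList; infer_instance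

-- ===== CLAIM (what is proved, stated in full; the proofs are below) =====
def Claim_equal_getPairList : Prop := ∀ (strList : List String), Dom_getPairList strList → Spec_getPairList strList (getPairList strList)

-- ===== LEMMAS AND PROOFS =====

-- the list of pairs formed from consecutive empty indices (all but the final segment)
def pairsInit : List Int → List (List Int)
  | [] => []
  | [_] => []
  | e1 :: e2 :: es => [e1, e2 - 1] :: pairsInit (e2 :: es)

-- A's loop state as a function of the empty indices seen so far
def stateOf : List Int → List (List Int) × List Int
  | [] => ([], [])
  | e :: es => (pairsInit (e :: es), [(e :: es).getLast!])

theorem getLast!_cons_cons (a b : Int) (l : List Int) :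
    (a :: b :: l).getLast! = (b :: l).getLast! := by
  simp [List.getLast!_eq_getLast?_getD, List.getLast?_cons_cons]

theorem pairsInit_append_last (e : Int) (es : List Int) (i : Int) :
    pairsInit ((e :: es) ++ [i]) = pairsInit (e :: es) ++ [[(e :: es).getLast!, i - 1]] := by
  induction es generalizing e with
  | nil => simp [pairsInit, List.getLast!_eq_getLast?_getD]
  | cons e2 es ih =>
    simp only [List.cons_append, pairsInit]
    rw [← List.cons_append, ih e2, getLast!_cons_cons]

theorem getLast!_concat_int (l : List Int) (a : Int) : (l ++ [a]).getLast! = a := by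
  simp [List.getLast!_eq_getLast?_getD]

theorem loop_stateOf (strList : List String) (n : Nat) :
    (List.range n).foldl (stepA strList) ([], [])
      = stateOf (((List.range n).filter
          (fun i => PySem.Str.len (strList.getD i "") == 0)).map (fun i => Int.ofNat i)) := by
  induction n with
  | zero => simp [stateOf]
  | succ n ih =>
    rw [List.range_succ, List.foldl_append, List.filter_append, ih]
    simp only [List.foldl_cons, List.foldl_nil, List.filter_cons, List.filter_nil,
      List.map_append]
    by_cases h : (PySem.Str.len (strList.getD n "") == 0) = true
    · rw [if_pos h]
      simp only [List.map_cons, List.map_nil]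
      cases hE : ((List.range n).filter
          (fun i => PySem.Str.len (strList.getD i "") == 0)).map (fun i => Int.ofNat i) with
      | nil =>
        simp only [stateOf, stepA]
        rw [if_pos h]
        simp [List.getLast!_eq_getLast?_getD, pairsInit]
      | cons e es =>
        rw [show ((e :: es) ++ [Int.ofNat n]) = e :: (es ++ [Int.ofNat n]) from rfl]
        simp only [stateOf, stepA]
        rw [if_pos h]
        rw [← List.cons_append, pairsInit_append_last, getLast!_concat_int]
        simp
    · rw [if_neg h]
      simp only [List.map_nil, List.append_nil, stepA]
      rw [if_neg h]
theorem map_range_pairsInit (E : List Int) :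
    (List.range (E.length - 1)).map
      (fun j => [E.getD j 0, E.getD (j + 1) 0 - 1]) = pairsInit E := by
  induction E with
  | nil => simp [pairsInit]
  | cons e es ih =>
    cases es with
    | nil => simp [pairsInit]
    | cons e2 es2 =>
      simp only [List.length_cons, Nat.add_sub_cancel, List.range_succ_eq_map, List.map_cons,
        List.map_map]
      have := ih
      simp only [List.length_cons, Nat.add_sub_cancel] at this
      rw [pairsInit]
      refine List.cons_eq_cons.mpr ⟨by simp [List.getD], ?_⟩
      rw [← this]
      apply List.map_congr_left
      intro j _
      simp [List.getD]

theorem drop_length_sub_one (E : List Int) :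
    E.drop (E.length - 1) = if E = [] then [] else [E.getLast!] := by
  induction E with
  | nil => simp
  | cons e es ih =>
    cases es with
    | nil => simp [List.getLast!_eq_getLast?_getD]
    | cons e2 es2 =>
      simp only [List.length_cons, Nat.add_sub_cancel, List.drop_succ_cons] at *
      have := ih
      simp only [reduceCtorEq, if_false] at this
      rw [getLast!_cons_cons]
      simpa using this

-- ===== VERDICT (by name: the statement is the Claim_ definition above) =====
theorem getPairList_spec : Claim_equal_getPairList := by
  intro strList _
  show getPairList strList = getPairList_alt strList
  unfold getPairList getPairList_alt
  rw [loop_stateOf]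
  rw [show (((List.range strList.length).filter
      (fun i => PySem.Str.len (strList.getD i "") == 0)).map (fun i => Int.ofNat i))
      = emptiesOf strList from rfl]
  rw [map_range_pairsInit, drop_length_sub_one]
  cases hE : emptiesOf strList with
  | nil => simp [stateOf, pairsInit]
  | cons e es => simp [stateOf]
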